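-- pv_equiv track=rewrite | github.com/Aasthaengg/IBMdataset | Python_codes/p03721/s253045353.py | myAnswer
-- ===== SOURCE A (Python) =====
-- def myAnswer(N:int,K:int,A:list,B:list) -> int:
--    dic = {}
--    for a,b in zip(A,B):
--       if a in dic.keys():
--          dic[a] += b
--       else:
--          dic[a] = b
--    total = 0
--    for a,b in sorted(dic.items()):
--       total += b
--       if K <= total:
--          return a
-- ===== SOURCE B (Python) =====
-- def myAnswer(N: int, K: int, A: list, B: list) -> int:
--     pairs = sorted(zip(A, B), key=lambda p: p[0])
--     n = len(pairs)
--     total = 0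
--     i = 0
--     while i < n:
--         a = pairs[i][0]
--         s = 0
--         while i < n and pairs[i][0] == a:
--             s += pairs[i][1]
--             i += 1
--         total += s
--         if K <= total:
--             return a
-- ===== Notes on version B (the rewrite author's own statement) =====
-- stated objective: alternative
-- what changed: B replaces A's build-a-dict-of-summed-weights-then-sort-the-items pipeline by sorting the zipped (value, weight) pairs once and walking them while grouping consecutive equal values, summing each whole group before comparing the running total with K; no dictionary is built.
-- outside the precondition, e.g. on myAnswer(1, 5, [0], [1]): A returns None, B returns None
import Mathlib
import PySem

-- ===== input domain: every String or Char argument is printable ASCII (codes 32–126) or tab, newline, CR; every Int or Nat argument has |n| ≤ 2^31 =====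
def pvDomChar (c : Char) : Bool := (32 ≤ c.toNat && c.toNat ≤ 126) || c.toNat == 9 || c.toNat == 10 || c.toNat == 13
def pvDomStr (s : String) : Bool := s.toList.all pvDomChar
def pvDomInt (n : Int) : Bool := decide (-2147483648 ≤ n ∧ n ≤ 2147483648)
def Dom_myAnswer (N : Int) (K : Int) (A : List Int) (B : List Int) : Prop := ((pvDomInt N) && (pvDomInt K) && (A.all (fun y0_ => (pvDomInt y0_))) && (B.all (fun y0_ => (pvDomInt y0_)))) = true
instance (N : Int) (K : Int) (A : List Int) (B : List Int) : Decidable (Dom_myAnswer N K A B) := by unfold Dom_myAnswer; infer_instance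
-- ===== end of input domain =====

-- B sorts the zipped (value, weight) pairs once and walks them grouping consecutive equal
-- values (summing each whole group before the K-comparison), instead of A's dict-of-sums
-- followed by sorting the items: an alternative decomposition with no dictionary.
-- Pre_ excludes inputs on which no cumulative group total ever reaches K: there Python A
-- falls off the loop and returns None, which is not a value of the declared int type.


-- ===== PORT A =====
-- the dict-building loop: if a in dic.keys(): dic[a] += b else: dic[a] = b
def aDict (L : List (Int × Int)) : PySem.Dict Int Int :=
  L.foldl
    (fun d p => if d.contains p.1 then d.insert p.1 (d.getD p.1 0 + p.2) else d.insert p.1 p.2)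
    PySem.Dict.empty

-- the second loop: total += b; if K <= total: return a   (none = fell off the loop, Python None)
def aLoop (K : Int) : List (Int × Int) → Int → Option Int
  | [], _ => none
  | p :: rest, total =>
      if K ≤ total + p.2 then some p.1 else aLoop K rest (total + p.2)

def myAnswer (N : Int) (K : Int) (A : List Int) (B : List Int) : Int :=
  -- sorted(dic.items()) = Python tuple sort = PySem.List.sorted2
  (aLoop K (PySem.List.sorted2 (aDict (A.zip B)).items (fun p => p.1) (fun p => p.2) false) 0).getD 0

-- ===== PORT B =====
-- the outer while loop of Source B: the inner while collects the group of the current value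
-- (takeWhile), sums its weights, adds to the running total, compares with K
def bLoop (K : Int) : List (Int × Int) → Int → Option Int
  | [], _ => none
  | p :: rest, total =>
      if K ≤ total + (p.2 + ((rest.takeWhile (fun q => q.1 == p.1)).map (fun q => q.2)).sum) then
        some p.1
      else
        bLoop K (rest.dropWhile (fun q => q.1 == p.1))
          (total + (p.2 + ((rest.takeWhile (fun q => q.1 == p.1)).map (fun q => q.2)).sum))
  termination_by l _ => l.length
  decreasing_by
    simp only [List.length_cons]
    exact Nat.lt_succ_of_le (List.length_dropWhile_le _ _)

def myAnswer_alt (N : Int) (K : Int) (A : List Int) (B : List Int) : Int :=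
  (bLoop K (PySem.List.sorted (A.zip B) (fun p => p.1) false) 0).getD 0

-- ===== PRECONDITION & SPEC =====
-- Pre_ excludes exactly the inputs on which A's loop never reaches K, where Python returns
-- None (no int value): the cumulative weight up to some present value must reach K.
def Pre_myAnswer (N : Int) (K : Int) (A : List Int) (B : List Int) : Prop :=
  ∃ p ∈ A.zip B, K ≤ (((A.zip B).filter (fun q => decide (q.1 ≤ p.1))).map (fun q => q.2)).sum
instance (N : Int) (K : Int) (A : List Int) (B : List Int) : Decidable (Pre_myAnswer N K A B) := by
  unfold Pre_myAnswer; infer_instance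
def pvWitness_myAnswer : Int × Int × List Int × List Int := (1, 1, [0], [1])

def Spec_myAnswer (N : Int) (K : Int) (A : List Int) (B : List Int) (out : Int) : Prop := out = myAnswer_alt N K A B
instance (N : Int) (K : Int) (A : List Int) (B : List Int) (out : Int) : Decidable (Spec_myAnswer N K A B out) := by unfold Spec_myAnswer; infer_instance

-- ===== CLAIM (what is proved, stated in full; the proofs are below) =====
def Claim_equal_myAnswer : Prop := ∀ (N : Int) (K : Int) (A : List Int) (B : List Int), Dom_myAnswer N K A B → Pre_myAnswer N K A B → Spec_myAnswer N K A B (myAnswer N K A B)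

-- ===== LEMMAS AND PROOFS =====

-- total weight attached to value k in the pair list L
def wsum (L : List (Int × Int)) (k : Int) : Int :=
  ((L.filter (fun p => p.1 == k)).map (fun p => p.2)).sum

-- proof-only mirror of bLoop's traversal: the grouped list it effectively walks
def collapse : List (Int × Int) → List (Int × Int)
  | [] => []
  | p :: rest =>
      (p.1, p.2 + ((rest.takeWhile (fun q => q.1 == p.1)).map (fun q => q.2)).sum)
        :: collapse (rest.dropWhile (fun q => q.1 == p.1))
  termination_by l => l.length
  decreasing_by
    simp only [List.length_cons]
    exact Nat.lt_succ_of_le (List.length_dropWhile_le _ _)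

lemma bLoop_eq_aLoop (K : Int) (S : List (Int × Int)) (t : Int) :
    bLoop K S t = aLoop K (collapse S) t := by
  induction S using collapse.induct generalizing t with
  | case1 => simp [bLoop, collapse, aLoop]
  | case2 p rest ih =>
      rw [bLoop, collapse]
      simp only [aLoop]
      split
      · rfl
      · exact ih _

lemma insertBy_fst_congr (x : Int × Int) (ys : List (Int × Int))
    (h : ∀ y ∈ ys, x.1 ≠ y.1) :
    PySem.List.insertBy
      (fun a b : Int × Int => decide (a.1 < b.1) || (!decide (b.1 < a.1) && decide (a.2 < b.2))) x ys
    = PySem.List.insertBy (fun a b : Int × Int => decide (a.1 < b.1)) x ys := by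
  induction ys with
  | nil => rfl
  | cons y ys ih =>
      have hxy : x.1 ≠ y.1 := h y (by simp)
      have hb : (decide (x.1 < y.1) || (!decide (y.1 < x.1) && decide (x.2 < y.2)))
          = decide (x.1 < y.1) := by
        rcases lt_trichotomy x.1 y.1 with hlt | heq | hgt
        · simp [hlt, not_lt_of_gt hlt]
        · exact absurd heq hxy
        · simp [hgt, not_lt_of_gt hgt]
      rw [PySem.List.insertBy, PySem.List.insertBy, hb]
      split
      · rfl
      · rw [ih (fun y hy => h y (by simp [hy]))]

lemma mem_insertBy_fst (before : Int × Int → Int × Int → Bool) (x y : Int × Int)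
    (ys : List (Int × Int)) (hy : y ∈ PySem.List.insertBy before x ys) : y = x ∨ y ∈ ys :=
  (PySem.List.mem_insertBy before x y ys).mp hy

lemma foldl_insertBy_fst_congr (l : List (Int × Int)) (acc : List (Int × Int))
    (hl : (l.map (fun p => p.1)).Nodup) (hacc : ∀ x ∈ l, ∀ y ∈ acc, x.1 ≠ y.1) :
    l.foldl (fun acc x => PySem.List.insertBy
      (fun a b : Int × Int => decide (a.1 < b.1) || (!decide (b.1 < a.1) && decide (a.2 < b.2))) x acc) acc
    = l.foldl (fun acc x => PySem.List.insertBy (fun a b : Int × Int => decide (a.1 < b.1)) x acc) acc := by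
  induction l generalizing acc with
  | nil => rfl
  | cons x l ih =>
      simp only [List.foldl_cons]
      rw [insertBy_fst_congr x acc (hacc x (by simp))]
      have hl' : (l.map (fun p => p.1)).Nodup := by
        simpa using hl.of_cons
      refine ih _ hl' ?_
      intro z hz y hy
      rcases mem_insertBy_fst _ _ _ _ hy with heq | hy'
      · have hx : x.1 ∉ l.map (fun p => p.1) := by
          simp only [List.map_cons, List.nodup_cons] at hl
          exact hl.1
        rw [heq]
        intro hcon
        exact hx (by simpa [hcon] using List.mem_map_of_mem (f := fun p => p.1) hz)
      · exact hacc z (by simp [hz]) y hy'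

lemma sorted2_eq_sorted_fst (xs : List (Int × Int)) (h : (xs.map (fun p => p.1)).Nodup) :
    PySem.List.sorted2 xs (fun p => p.1) (fun p => p.2) false
      = PySem.List.sorted xs (fun p => p.1) false := by
  simp only [PySem.List.sorted2, PySem.List.sorted]
  exact foldl_insertBy_fst_congr xs [] h (by simp)

lemma aDict_eq_uniform (L : List (Int × Int)) :
    aDict L = L.foldl (fun d p => d.insert p.1 (d.getD p.1 0 + p.2)) PySem.Dict.empty := by
  unfold aDict
  refine PySem.List.foldl_congr_mem L _ _ _ ?_
  intro d p _
  by_cases hc : d.contains p.1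
  · simp [hc]
  · simp only [hc, if_false]
    rw [PySem.Dict.getD_of_not_contains (h := by simpa using hc)]
    simp

lemma getD_foldl_insert_add (l : List (Int × Int)) (d : PySem.Dict Int Int) (k : Int) :
    (l.foldl (fun d p => d.insert p.1 (d.getD p.1 0 + p.2)) d).getD k 0
      = d.getD k 0 + wsum l k := by
  induction l generalizing d with
  | nil => simp [wsum]
  | cons p l ih =>
      simp only [List.foldl_cons]
      rw [ih]
      by_cases hk : p.1 = k
      · subst hk
        simp [wsum, List.filter_cons, PySem.Dict.getD_insert_self]
        ring
      · rw [PySem.Dict.getD_insert_of_ne d (d.getD p.1 0 + p.2) 0 (Ne.symm hk)]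
        simp [wsum, List.filter_cons, hk]

lemma keys_aDict (L : List (Int × Int)) :
    (aDict L).keys = PySem.Set.ofList (L.map (fun p => p.1)) := by
  rw [aDict_eq_uniform]
  rw [PySem.Dict.keys_foldl_insert_key L (fun p => p.1)
    (fun d p => d.getD p.1 0 + p.2) PySem.Dict.empty]
  simp [PySem.Dict.keys_empty, PySem.Set.update, PySem.Set.ofList_eq_foldl]

lemma nodup_keys_aDict (L : List (Int × Int)) : (aDict L).keys.Nodup := by
  rw [aDict_eq_uniform]
  exact PySem.Dict.nodup_keys_foldl_insert_key L (fun p => p.1) _ PySem.Dict.empty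
    (by simp [PySem.Dict.keys_empty])

lemma items_aDict (L : List (Int × Int)) :
    (aDict L).items = (PySem.Set.ofList (L.map (fun p => p.1))).map (fun k => (k, wsum L k)) := by
  rw [PySem.Dict.items_eq_map_keys (aDict L) (nodup_keys_aDict L) 0, keys_aDict]
  refine List.map_congr_left ?_
  intro k _
  rw [aDict_eq_uniform, getD_foldl_insert_add]
  simp [PySem.Dict.getD_empty]

lemma pairs_eq_map_fst (xs : List (Int × Int)) (f : Int → Int)
    (h : ∀ p ∈ xs, p.2 = f p.1) :
    xs = (xs.map (fun p => p.1)).map (fun k => (k, f k)) := by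
  induction xs with
  | nil => rfl
  | cons p xs ih =>
      simp only [List.map_cons, List.cons.injEq]
      constructor
      · have := h p (by simp)
        exact Prod.ext rfl this
      · exact ih (fun q hq => h q (by simp [hq]))

lemma eq_of_grouped (xs ys : List (Int × Int)) (f : Int → Int)
    (hx1 : xs.Pairwise (fun p q => p.1 < q.1)) (hy1 : ys.Pairwise (fun p q => p.1 < q.1))
    (hmem : ∀ k, k ∈ xs.map (fun p => p.1) ↔ k ∈ ys.map (fun p => p.1))
    (hx2 : ∀ p ∈ xs, p.2 = f p.1) (hy2 : ∀ p ∈ ys, p.2 = f p.1) : xs = ys := by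
  have hxk : (xs.map (fun p => p.1)).Pairwise (· < ·) := List.pairwise_map.mpr hx1
  have hyk : (ys.map (fun p => p.1)).Pairwise (· < ·) := List.pairwise_map.mpr hy1
  have hxn : (xs.map (fun p => p.1)).Nodup := hxk.imp ne_of_lt
  have hyn : (ys.map (fun p => p.1)).Nodup := hyk.imp ne_of_lt
  have hperm : (xs.map (fun p => p.1)).Perm (ys.map (fun p => p.1)) :=
    (List.perm_ext_iff_of_nodup hxn hyn).mpr hmem
  have hkeys : xs.map (fun p => p.1) = ys.map (fun p => p.1) :=
    List.Perm.eq_of_pairwise (fun _ _ _ _ h1 h2 => le_antisymm h1 h2)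
      (hxk.imp le_of_lt) (hyk.imp le_of_lt) hperm
  rw [pairs_eq_map_fst xs f hx2, pairs_eq_map_fst ys f hy2, hkeys]

lemma collapse_spec (S : List (Int × Int)) (hS : S.Pairwise (fun p q => p.1 ≤ q.1)) :
    (collapse S).Pairwise (fun p q => p.1 < q.1)
    ∧ (∀ k, k ∈ (collapse S).map (fun p => p.1) ↔ k ∈ S.map (fun p => p.1))
    ∧ (∀ p ∈ collapse S, p.2 = wsum S p.1) := by
  induction S using collapse.induct with
  | case1 => simp [collapse]
  | case2 p rest ih =>
      rw [List.pairwise_cons] at hS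
      obtain ⟨hhead, hrest⟩ := hS
      set grp := rest.takeWhile (fun q => q.1 == p.1) with hgrpdef
      set rest' := rest.dropWhile (fun q => q.1 == p.1) with hrestdef
      have hsplit : grp ++ rest' = rest := List.takeWhile_append_dropWhile
      have hgrp : ∀ q ∈ grp, q.1 = p.1 := by
        intro q hq
        have := List.mem_takeWhile_imp hq
        simpa using this
      have hrest'sub : rest'.Sublist rest := List.dropWhile_sublist _
      have hrest'pw : rest'.Pairwise (fun p q => p.1 ≤ q.1) := hrest.sublist hrest'sub
      have hge : ∀ q ∈ rest', p.1 ≤ q.1 := fun q hq => hhead q (hrest'sub.mem hq)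
      have hne : ∀ q ∈ rest', q.1 ≠ p.1 := by
        intro q hq
        match hr : rest' with
        | [] => rw [hr] at hq; simp at hq
        | q' :: t =>
            have hq'pred : (q'.1 == p.1) = false := by
              have := List.head?_dropWhile_not (fun q => q.1 == p.1) rest
              rw [← hrestdef, hr] at this
              simpa using this
            have hq'ne : q'.1 ≠ p.1 := by simpa using hq'pred
            have hq'lt : p.1 < q'.1 :=
              lt_of_le_of_ne (hge q' (by rw [hr]; simp)) (Ne.symm hq'ne)
            rw [hr] at hq
            rcases List.mem_cons.mp hq with heq | hq2
            · rw [heq]; exact hq'ne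
            · have hle : q'.1 ≤ q.1 := by
                rw [hr] at hrest'pw
                exact (List.pairwise_cons.mp hrest'pw).1 q hq2
              exact fun hcon => absurd (hcon ▸ hle) (not_le_of_gt hq'lt)
      have hwhead : wsum (p :: rest) p.1 = p.2 + (grp.map (fun q => q.2)).sum := by
        rw [← hsplit]
        simp only [wsum, List.filter_cons, List.filter_append]
        rw [List.filter_eq_self.mpr (fun q hq => by simp [hgrp q hq]),
            List.filter_eq_nil_iff.mpr (fun q hq => by simp [hne q hq])]
        simp
      have hwtail : ∀ k, k ≠ p.1 → wsum (p :: rest) k = wsum rest' k := by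
        intro k hk
        rw [← hsplit]
        simp only [wsum, List.filter_cons, List.filter_append]
        rw [List.filter_eq_nil_iff.mpr (fun q hq => by simp [hgrp q hq, Ne.symm hk])]
        simp [Ne.symm hk, fun h => hk (by omega)]
      obtain ⟨ih1, ih2, ih3⟩ := ih hrest'pw
      rw [collapse]
      refine ⟨?_, ?_, ?_⟩
      · rw [List.pairwise_cons]
        refine ⟨?_, ih1⟩
        intro q hq
        have : q.1 ∈ rest'.map (fun p => p.1) := (ih2 q.1).mp (List.mem_map_of_mem hq)
        obtain ⟨r, hr, hrq⟩ := List.mem_map.mp this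
        rw [← hrq]
        exact lt_of_le_of_ne (hge r hr) (Ne.symm (hne r hr))
      · intro k
        simp only [List.map_cons, List.mem_cons]
        rw [ih2 k]
        by_cases hk : k = p.1
        · simp [hk]
        · simp only [hk, false_or]
          rw [← hsplit]
          simp only [List.map_append, List.mem_append]
          constructor
          · intro h; exact Or.inr h
          · rintro (h | h)
            · obtain ⟨r, hr, hrk⟩ := List.mem_map.mp h
              exact absurd (hrk ▸ hgrp r hr) hk
            · exact h
      · intro q hq
        rcases List.mem_cons.mp hq with rfl | hq'
        · exact hwhead.symm
        · have hqk : q.1 ≠ p.1 := by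
            have : q.1 ∈ rest'.map (fun p => p.1) := (ih2 q.1).mp (List.mem_map_of_mem hq')
            obtain ⟨r, hr, hrq⟩ := List.mem_map.mp this
            rw [← hrq]; exact hne r hr
          rw [hwtail q.1 hqk]
          exact ih3 q hq'

lemma wsum_perm (S L : List (Int × Int)) (h : S.Perm L) (k : Int) : wsum S k = wsum L k := by
  unfold wsum
  exact List.Perm.sum_eq (List.Perm.map _ (List.Perm.filter _ h))

lemma main_eq (K : Int) (L : List (Int × Int)) :
    PySem.List.sorted2 (aDict L).items (fun p => p.1) (fun p => p.2) false
      = collapse (PySem.List.sorted L (fun p => p.1) false) := by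
  set S := PySem.List.sorted L (fun p => p.1) false with hSdef
  have hSperm : S.Perm L := PySem.List.sorted_perm L (fun p => p.1) false
  have hSpw : S.Pairwise (fun p q => p.1 ≤ q.1) := PySem.List.sorted_pairwise L (fun p => p.1)
  obtain ⟨hc1, hc2, hc3⟩ := collapse_spec S hSpw
  have hitems := items_aDict L
  have hitemsfst : (aDict L).items.map (fun p => p.1) = PySem.Set.ofList (L.map (fun p => p.1)) := by
    rw [hitems, List.map_map]
    simp [Function.comp_def]
  have hnodup : ((aDict L).items.map (fun p => p.1)).Nodup := by
    rw [hitemsfst]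
    exact PySem.Set.nodup_ofList _
  rw [sorted2_eq_sorted_fst _ hnodup]
  set X := PySem.List.sorted (aDict L).items (fun p => p.1) false with hXdef
  have hXperm : X.Perm (aDict L).items := PySem.List.sorted_perm _ _ _
  have hXpw : X.Pairwise (fun p q => p.1 ≤ q.1) := PySem.List.sorted_pairwise _ _
  have hXfstperm : (X.map (fun p => p.1)).Perm ((aDict L).items.map (fun p => p.1)) :=
    hXperm.map _
  have hXnodup : (X.map (fun p => p.1)).Nodup := hXfstperm.nodup_iff.mpr hnodup
  have hXlt : X.Pairwise (fun p q => p.1 < q.1) := by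
    have hne : X.Pairwise (fun p q => p.1 ≠ q.1) := by
      rw [← List.pairwise_map (f := fun p : Int × Int => p.1)]
      exact hXnodup
    exact (hXpw.and hne).imp (fun h => lt_of_le_of_ne h.1 h.2)
  refine eq_of_grouped X (collapse S) (wsum L) hXlt hc1 ?_ ?_ ?_
  · intro k
    rw [hc2 k]
    have h1 : k ∈ X.map (fun p => p.1) ↔ k ∈ (aDict L).items.map (fun p => p.1) :=
      hXfstperm.mem_iff
    have h2 : k ∈ S.map (fun p => p.1) ↔ k ∈ L.map (fun p => p.1) := (hSperm.map _).mem_iff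
    rw [h1, h2, hitemsfst]
    simp [PySem.Set.mem_ofList]
  · intro q hq
    have : q ∈ (aDict L).items := hXperm.mem_iff.mp hq
    rw [hitems] at this
    obtain ⟨k, _, hk⟩ := List.mem_map.mp this
    rw [← hk]
  · intro q hq
    rw [hc3 q hq, wsum_perm S L hSperm]

-- ===== VERDICT (by name: the statement is the Claim_ definition above) =====
theorem myAnswer_spec : Claim_equal_myAnswer := by
  intro N K A B _ _
  unfold Spec_myAnswer myAnswer myAnswer_alt
  rw [main_eq K (A.zip B), bLoop_eq_aLoop]
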